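-- pv_equiv track=rewrite | github.com/ashique6465/DSA | Companies/Accenture/2024/song.py | maxFavSong
-- ===== SOURCE A (Python) =====
-- def maxFavSong(S,k):
--     n = len(S)
--     if S is None:
--         return None
--     if n < k :
--         return 0
--     max_count = count_a = S[:k].count('a')
--
--     for i in range(1,n-k+1):
--         if S[i-1] == 'a':
--             count_a -= 1
--         if S[i+k-1] == 'a':
--             count_a +=1
--         max_count = max(max_count,count_a)
--     return max_count
-- ===== SOURCE B (Python) =====
-- def maxFavSong(S, k):
--     n = len(S)
--     if n < k:
--         return 0
--     pref = [0]
--     for c in S: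
--         pref.append(pref[-1] + (c == 'a'))
--     return max(pref[j + k] - pref[j] for j in range(n - k + 1))
-- ===== Notes on version B (the rewrite author's own statement) =====
-- stated objective: alternative
-- what changed: Replaces A's incremental sliding-window counter (subtract the char leaving, add the char entering, tracking a running max) with a precomputed prefix-count table scanned once with max over window differences.
import Mathlib
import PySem

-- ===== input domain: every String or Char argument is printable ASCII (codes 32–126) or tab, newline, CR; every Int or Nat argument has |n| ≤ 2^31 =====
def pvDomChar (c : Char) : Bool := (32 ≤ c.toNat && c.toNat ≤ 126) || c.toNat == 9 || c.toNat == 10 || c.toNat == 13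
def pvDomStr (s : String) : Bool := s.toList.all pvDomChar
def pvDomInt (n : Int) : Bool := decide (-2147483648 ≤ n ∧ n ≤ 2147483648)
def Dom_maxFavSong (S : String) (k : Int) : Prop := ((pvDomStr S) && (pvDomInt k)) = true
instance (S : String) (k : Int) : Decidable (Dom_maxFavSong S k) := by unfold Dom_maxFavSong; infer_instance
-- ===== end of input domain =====

-- B replaces A's incremental sliding-window counter with a prefix-count table scanned once (alternative decomposition, same cost).


-- ===== PORT A =====
-- Literal port of A: running count of 'a' over a sliding window with an inline max.
-- (A's 'if S is None' guard is unreachable after 'len(S)' and has no Lean counterpart for a String.)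
def maxFavSong (S : String) (k : Int) : Int :=
  let L := S.toList
  let n : Int := L.length
  if n < k then 0
  else
    let c0 : Int := ((PySem.List.slice L none (some k)).count 'a' : Int)
    let st := (PySem.List.pyRange 1 (n - k + 1) 1).foldl
      (fun (p : Int × Int) i =>
        let c1 := if PySem.List.pyGetD L (i - 1) 'x' = 'a' then p.2 - 1 else p.2
        let c2 := if PySem.List.pyGetD L (i + k - 1) 'x' = 'a' then c1 + 1 else c1
        (max p.1 c2, c2)) (c0, c0)
    st.1

-- ===== PORT B =====
-- Port of B: build the prefix table (pref[-1] is List.getLastD), then max over window differences.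
def maxFavSong_alt (S : String) (k : Int) : Int :=
  let L := S.toList
  let n : Int := L.length
  if n < k then 0
  else
    let pref : List Int := L.foldl
      (fun acc c => acc ++ [acc.getLastD 0 + (if c = 'a' then 1 else 0)]) [0]
    let vals := (PySem.List.pyRange 0 (n - k + 1) 1).map
      (fun j => PySem.List.pyGetD pref (j + k) 0 - PySem.List.pyGetD pref j 0)
    match vals with
    | [] => 0
    | v :: vs => vs.foldl max v

-- ===== PRECONDITION & SPEC =====
-- Pre_ excludes k < 0, where A raises IndexError (the loop reads S[i-1] past the end).
def Pre_maxFavSong (S : String) (k : Int) : Prop := 0 ≤ k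
instance (S : String) (k : Int) : Decidable (Pre_maxFavSong S k) := by unfold Pre_maxFavSong; infer_instance
def pvWitness_maxFavSong : String × Int := ("abcab", 2)

def Spec_maxFavSong (S : String) (k : Int) (out : Int) : Prop := out = maxFavSong_alt S k
instance (S : String) (k : Int) (out : Int) : Decidable (Spec_maxFavSong S k out) := by unfold Spec_maxFavSong; infer_instance

-- ===== CLAIM (what is proved, stated in full; the proofs are below) =====
def Claim_equal_maxFavSong : Prop := ∀ (S : String) (k : Int), Dom_maxFavSong S k → Pre_maxFavSong S k → Spec_maxFavSong S k (maxFavSong S k)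

-- ===== LEMMAS AND PROOFS =====

-- number of 'a' in a list, as an Int
def aCount (xs : List Char) : Int := (xs.count 'a' : Int)

-- count of 'a' in the window of length K starting at j
def win (L : List Char) (K j : Nat) : Int := aCount ((L.drop j).take K)

-- the common value both ports compute (for 0 ≤ k ≤ n)
def target (L : List Char) (K : Nat) : Int :=
  ((List.range (L.length - K)).map (fun j => win L K (j + 1))).foldl max (win L K 0)

theorem aCount_append (xs ys : List Char) : aCount (xs ++ ys) = aCount xs + aCount ys := by
  simp [aCount, List.count_append]

theorem aCount_singleton (c : Char) : aCount [c] = if c = 'a' then 1 else 0 := by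
  by_cases h : c = 'a' <;> simp [aCount, h]

theorem aCount_cons (c : Char) (xs : List Char) :
    aCount (c :: xs) = aCount xs + (if c = 'a' then 1 else 0) := by
  by_cases h : c = 'a' <;> simp [aCount, h]

-- sliding-window identity, in additive (subtraction-free) form
theorem win_succ (L : List Char) (K m : Nat) (h : m + K < L.length) :
    win L K (m + 1) + (if L[m]'(by omega) = 'a' then (1:Int) else 0)
      = win L K m + (if L[m + K]'h = 'a' then (1:Int) else 0) := by
  cases K with
  | zero => simp [win]
  | succ K' =>
    have hm : m < L.length := by omega
    have h1 : L.drop m = L[m]'hm :: L.drop (m + 1) := List.drop_eq_getElem_cons hm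
    have h2 : K' < (L.drop (m + 1)).length := by simp; omega
    have h3 : (L.drop (m + 1)).take (K' + 1)
        = (L.drop (m + 1)).take K' ++ [(L.drop (m + 1))[K']'h2] := by
      rw [List.take_add_one]; simp [List.getElem?_eq_getElem h2]
    have h4 : (L.drop (m + 1))[K']'h2 = L[m + K' + 1]'(by omega) := by
      simp only [List.getElem_drop]; congr 1; omega
    have h5 : m + (K' + 1) = m + K' + 1 := by omega
    rw [win, win, h1, List.take_succ_cons, h3, h4, aCount_append, aCount_singleton, aCount_cons]
    simp only [h5]
    ring

-- ===== A side =====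

theorem A_loop (L : List Char) (K : Nat) (hK : K ≤ L.length) (m : Nat) (hm : m ≤ L.length - K) :
    (PySem.List.pyRange 1 ((m : Int) + 1) 1).foldl
      (fun (p : Int × Int) i =>
        (max p.1 (if PySem.List.pyGetD L (i + (K : Int) - 1) 'x' = 'a'
            then (if PySem.List.pyGetD L (i - 1) 'x' = 'a' then p.2 - 1 else p.2) + 1
            else (if PySem.List.pyGetD L (i - 1) 'x' = 'a' then p.2 - 1 else p.2)),
          if PySem.List.pyGetD L (i + (K : Int) - 1) 'x' = 'a'
            then (if PySem.List.pyGetD L (i - 1) 'x' = 'a' then p.2 - 1 else p.2) + 1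
            else (if PySem.List.pyGetD L (i - 1) 'x' = 'a' then p.2 - 1 else p.2)))
      (win L K 0, win L K 0)
    = (((List.range m).map (fun j => win L K (j + 1))).foldl max (win L K 0), win L K m) := by
  induction m with
  | zero =>
    rw [show ((0 : Nat) : Int) + 1 = 1 by norm_num, PySem.List.pyRange_one_eq_nil (le_refl 1)]
    simp
  | succ m ih =>
    have hm' : m ≤ L.length - K := by omega
    have hmK : m + K < L.length := by omega
    have hmL : m < L.length := by omega
    have hsplit : PySem.List.pyRange 1 ((↑(m + 1) : Int) + 1) 1
        = PySem.List.pyRange 1 ((m : Int) + 1) 1 ++ [(m : Int) + 1] := by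
      push_cast
      exact PySem.List.pyRange_one_succ_right (by omega)
    rw [hsplit, List.foldl_append, ih hm']
    have hg1 : PySem.List.pyGetD L ((m : Int) + 1 - 1) 'x' = L[m]'hmL := by
      rw [show (m : Int) + 1 - 1 = (m : Int) by ring, PySem.List.pyGetD_natCast]
      exact List.getD_eq_getElem L 'x' hmL
    have hg2 : PySem.List.pyGetD L ((m : Int) + 1 + (K : Int) - 1) 'x' = L[m + K]'hmK := by
      rw [show (m : Int) + 1 + (K : Int) - 1 = ((m + K : Nat) : Int) by push_cast; ring,
        PySem.List.pyGetD_natCast]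
      exact List.getD_eq_getElem L 'x' hmK
    have hslide := win_succ L K m hmK
    simp only [List.foldl_cons, List.foldl_nil, hg1, hg2, List.range_succ, List.map_append,
      List.foldl_append, List.map_cons, List.map_nil]
    by_cases hx : L[m]'hmL = 'a' <;> by_cases hy : L[m + K]'hmK = 'a' <;>
      (try simp only [hx, hy, if_true, if_false] at hslide ⊢) <;>
      (try simp [hx, hy] at hslide ⊢) <;>
      (first
        | (rw [show win L K m - 1 + 1 = win L K (m + 1) by omega])
        | (rw [show win L K m + 1 = win L K (m + 1) by omega])
        | (rw [show win L K m - 1 = win L K (m + 1) by omega])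
        | (rw [show win L K m = win L K (m + 1) by omega])) <;>
      simp

theorem A_eq (S : String) (k : Int) (h0 : 0 ≤ k) :
    maxFavSong S k
    = if (S.toList.length : Int) < k then 0 else target S.toList k.toNat := by
  obtain ⟨K, rfl⟩ : ∃ K : Nat, k = (K : Int) := ⟨k.toNat, (Int.toNat_of_nonneg h0).symm⟩
  simp only [maxFavSong, Int.toNat_natCast]
  split_ifs with h
  · rfl
  · have hK : K ≤ S.toList.length := by exact_mod_cast not_lt.mp h
    have hc0 : ((PySem.List.slice S.toList none (some (K : Int))).count 'a' : Int)
        = win S.toList K 0 := by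
      rw [PySem.List.slice_to_natCast]
      simp only [win, List.drop_zero, aCount]
    have hb : (S.toList.length : Int) - (K : Int) + 1
        = ((S.toList.length - K : Nat) : Int) + 1 := by push_cast [hK]; omega
    rw [hc0, hb, A_loop S.toList K hK (S.toList.length - K) (le_refl _)]
    rfl

-- ===== B side =====

-- running prefix totals produced by B's loop, starting from total t
def runPref (t : Int) : List Char → List Int
  | [] => []
  | c :: cs => (t + (if c = 'a' then 1 else 0)) :: runPref (t + (if c = 'a' then 1 else 0)) cs

theorem foldl_runPref (L : List Char) : ∀ (acc : List Int), acc ≠ [] →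
    L.foldl (fun acc c => acc ++ [acc.getLastD 0 + (if c = 'a' then 1 else 0)]) acc
    = acc ++ runPref (acc.getLastD 0) L := by
  induction L with
  | nil => intro acc _; simp [runPref]
  | cons c cs ih =>
    intro acc hacc
    simp only [List.foldl_cons]
    rw [ih _ (by simp)]
    rw [show (acc ++ [acc.getLastD 0 + (if c = 'a' then 1 else 0)]).getLastD 0
        = acc.getLastD 0 + (if c = 'a' then 1 else 0) from List.getLastD_concat]
    rw [runPref]
    simp

theorem runPref_eq (L : List Char) : ∀ (t : Int),
    runPref t L = (List.range L.length).map (fun i => t + aCount (L.take (i + 1))) := by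
  induction L with
  | nil => intro t; simp [runPref]
  | cons c cs ih =>
    intro t
    rw [runPref, ih, List.length_cons, List.range_succ_eq_map, List.map_cons, List.map_map]
    congr 1
    · simp [List.take_succ_cons, aCount_singleton]
    · apply List.map_congr_left
      intro i _
      simp only [Function.comp_apply, Nat.succ_eq_add_one]
      rw [List.take_succ_cons, aCount_cons]
      ring

-- pref[j] is the number of 'a' among the first j characters
theorem pref_getD (L : List Char) (j : Nat) (hj : j ≤ L.length) :
    PySem.List.pyGetD
      (L.foldl (fun acc c => acc ++ [acc.getLastD 0 + (if c = 'a' then 1 else 0)]) [0]) (j : Int) 0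
    = aCount (L.take j) := by
  rw [foldl_runPref L [0] (by simp)]
  rw [show ([0] : List Int).getLastD 0 = 0 from rfl, runPref_eq, PySem.List.pyGetD_natCast]
  cases j with
  | zero => simp [aCount]
  | succ j' =>
    have hj' : j' < L.length := by omega
    simp only [List.singleton_append, List.getD_cons_succ]
    rw [List.getD_eq_getElem _ 0 (by simpa using hj')]
    simp

theorem win_eq_pref (L : List Char) (K j : Nat) :
    aCount (L.take (j + K)) - aCount (L.take j) = win L K j := by
  rw [List.take_add, aCount_append, win]
  ring

theorem B_eq (S : String) (k : Int) (h0 : 0 ≤ k) :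
    maxFavSong_alt S k
    = if (S.toList.length : Int) < k then 0 else target S.toList k.toNat := by
  obtain ⟨K, rfl⟩ : ∃ K : Nat, k = (K : Int) := ⟨k.toNat, (Int.toNat_of_nonneg h0).symm⟩
  simp only [maxFavSong_alt, Int.toNat_natCast]
  split_ifs with h
  · rfl
  · have hK : K ≤ S.toList.length := by exact_mod_cast not_lt.mp h
    have hb : (S.toList.length : Int) - (K : Int) + 1
        = (((S.toList.length - K) + 1 : Nat) : Int) := by push_cast [hK]; omega
    rw [hb, PySem.List.pyRange_zero_natCast, List.map_map]
    have hmap : ((List.range ((S.toList.length - K) + 1)).map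
        ((fun j => PySem.List.pyGetD
            (S.toList.foldl (fun acc c => acc ++ [acc.getLastD 0 + (if c = 'a' then 1 else 0)]) [0]) (j + (K : Int)) 0
          - PySem.List.pyGetD
            (S.toList.foldl (fun acc c => acc ++ [acc.getLastD 0 + (if c = 'a' then 1 else 0)]) [0]) j 0)
          ∘ (fun n : Nat => (n : Int))))
        = (List.range ((S.toList.length - K) + 1)).map (fun j => win S.toList K j) := by
      apply List.map_congr_left
      intro j hj
      have hjm : j ≤ S.toList.length - K := by
        simpa [Nat.lt_succ_iff] using hj
      simp only [Function.comp]
      rw [show ((j : Int)) + (K : Int) = ((j + K : Nat) : Int) by push_cast; ring]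
      rw [pref_getD S.toList (j + K) (by omega), pref_getD S.toList j (by omega)]
      exact win_eq_pref S.toList K j
    rw [hmap, List.range_succ_eq_map, List.map_cons, List.map_map]
    rfl

-- ===== VERDICT (by name: the statement is the Claim_ definition above) =====
theorem maxFavSong_spec : Claim_equal_maxFavSong := by
  intro S k _ hpre
  unfold Spec_maxFavSong
  rw [A_eq S k hpre, B_eq S k hpre]
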